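-- pv_equiv track=rewrite | github.com/HattoryChan/PythonProject | anyQuestions.py | CreateListOfThreeArray
-- ===== SOURCE A (Python) =====
-- def CreateListOfThreeArray(data : list):
--     fArr = []
--     sArr = []
--     tArr = []
--     for f in range(0, len(data), 3):
--         fArr.append(data[f])
--
--     for f in range(1, len(data), 3):
--         sArr.append(data[f])
--
--     for f in range(2, len(data), 3):
--         tArr.append(data[f])
--
--     return    fArr,sArr,tArr
-- ===== SOURCE B (Python) =====
-- def CreateListOfThreeArray(data : list):
--     fArr = []
--     sArr = []
--     tArr = []
--     for i, v in enumerate(data):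
--         r = i % 3
--         if r == 0:
--             fArr.append(v)
--         elif r == 1:
--             sArr.append(v)
--         else:
--             tArr.append(v)
--     return fArr, sArr, tArr
-- ===== Notes on version B (the rewrite author's own statement) =====
-- stated objective: simpler
-- what changed: Replaces A's three separate index-range passes over the list with a single pass over enumerate(data) that dispatches each element to one of the three output lists by i % 3.
import Mathlib
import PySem

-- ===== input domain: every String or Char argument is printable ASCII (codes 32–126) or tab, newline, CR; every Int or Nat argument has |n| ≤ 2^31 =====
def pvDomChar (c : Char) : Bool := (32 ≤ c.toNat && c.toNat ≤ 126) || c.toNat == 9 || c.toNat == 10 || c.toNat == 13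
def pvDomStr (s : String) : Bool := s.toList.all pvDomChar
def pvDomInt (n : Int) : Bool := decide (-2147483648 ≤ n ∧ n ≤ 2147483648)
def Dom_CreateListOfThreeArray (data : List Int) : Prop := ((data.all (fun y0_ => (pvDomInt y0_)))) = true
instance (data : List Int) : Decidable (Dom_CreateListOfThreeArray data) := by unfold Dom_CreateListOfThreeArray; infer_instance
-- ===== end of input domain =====

-- B replaces A's three index-range passes with one pass over enumerate(data) dispatching on i % 3 (simpler single traversal, same results).

-- ===== PORT A =====
-- Each 'for f in range(k, len(data), 3): arr.append(data[f])' loop is a foldl over pyRange.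
-- data[f] is ported as pyGetD with default 0; every index produced by the range is in bounds,
-- so the default is never used (totality guard only) and A never raises.
def CreateListOfThreeArray (data : List Int) : List Int × List Int × List Int :=
  let fArr : List Int :=
    (PySem.List.pyRange 0 (data.length : Int) 3).foldl (fun acc f => acc ++ [PySem.List.pyGetD data f 0]) []
  let sArr : List Int :=
    (PySem.List.pyRange 1 (data.length : Int) 3).foldl (fun acc f => acc ++ [PySem.List.pyGetD data f 0]) []
  let tArr : List Int :=
    (PySem.List.pyRange 2 (data.length : Int) 3).foldl (fun acc f => acc ++ [PySem.List.pyGetD data f 0]) []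
  (fArr, sArr, tArr)

-- ===== PORT B =====
-- one loop body: dispatch (i, v) on i % 3
def pvStepB (acc : List Int × List Int × List Int) (iv : Int × Int) : List Int × List Int × List Int :=
  let r := PySem.Int.mod iv.1 3
  if r = 0 then (acc.1 ++ [iv.2], acc.2.1, acc.2.2)
  else if r = 1 then (acc.1, acc.2.1 ++ [iv.2], acc.2.2)
  else (acc.1, acc.2.1, acc.2.2 ++ [iv.2])

def CreateListOfThreeArray_alt (data : List Int) : List Int × List Int × List Int :=
  (PySem.List.enumerate data 0).foldl pvStepB ([], [], [])

-- ===== PRECONDITION & SPEC =====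
def Spec_CreateListOfThreeArray (data : List Int) (out : List Int × List Int × List Int) : Prop := out = CreateListOfThreeArray_alt data
instance (data : List Int) (out : List Int × List Int × List Int) : Decidable (Spec_CreateListOfThreeArray data out) := by unfold Spec_CreateListOfThreeArray; infer_instance

-- ===== CLAIM (what is proved, stated in full; the proofs are below) =====
def Claim_equal_CreateListOfThreeArray : Prop := ∀ (data : List Int), Dom_CreateListOfThreeArray data → Spec_CreateListOfThreeArray data (CreateListOfThreeArray data)

-- ===== LEMMAS AND PROOFS =====

-- every third element, starting at the head
def pvEvery3 : List Int → List Int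
  | [] => []
  | a :: l => a :: pvEvery3 (l.drop 2)
termination_by data => data.length
decreasing_by simp

-- append-accumulator foldl is init ++ map
theorem pv_foldl_append_map (xs : List Int) (g : Int → Int) (init : List Int) :
    xs.foldl (fun acc f => acc ++ [g f]) init = init ++ xs.map g := by
  induction xs generalizing init with
  | nil => simp
  | cons x xs ih => simp [List.foldl_cons, ih, List.append_assoc]

theorem pv_pyRange3_nil (a b : Int) (h : b ≤ a) : PySem.List.pyRange a b 3 = [] := by
  rw [PySem.List.pyRange_of_pos a b (by norm_num)]
  rw [if_neg (by omega)]
  simp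

theorem pv_pyRange3_shift (a b : Int) :
    PySem.List.pyRange (a + 3) (b + 3) 3 = (PySem.List.pyRange a b 3).map (· + 3) := by
  rw [PySem.List.pyRange_of_pos (a+3) (b+3) (by norm_num),
      PySem.List.pyRange_of_pos a b (by norm_num)]
  by_cases hab : a < b
  · rw [if_pos (by omega), if_pos hab,
        show b + 3 - (a + 3) + 3 - 1 = b - a + 3 - 1 from by ring, List.map_map]
    apply List.map_congr_left
    intro k _
    simp [Function.comp]
    ring
  · rw [if_neg (by omega), if_neg hab]
    simp

theorem pv_pyRange3_cons (a b : Int) (h : a < b) :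
    PySem.List.pyRange a b 3 = a :: PySem.List.pyRange (a + 3) b 3 := by
  rw [PySem.List.pyRange_of_pos a b (by norm_num),
      PySem.List.pyRange_of_pos (a+3) b (by norm_num)]
  rw [if_pos h]
  by_cases h2 : a + 3 < b
  · rw [if_pos h2]
    have hc : ((b - a + 3 - 1) / 3).toNat = ((b - (a + 3) + 3 - 1) / 3).toNat + 1 := by
      have : b - a + 3 - 1 = (b - (a + 3) + 3 - 1) + 3 := by ring
      rw [this]
      omega
    rw [hc, List.range_succ_eq_map, List.map_cons, List.map_map]
    congr 1
    · simp
    · apply List.map_congr_left; intro k _; simp [Function.comp]; ring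
  · rw [if_neg h2]
    have hc : ((b - a + 3 - 1) / 3).toNat = 1 := by omega
    rw [hc]
    simp

theorem pv_pyGetD_cons3 (x y z : Int) (l : List Int) (i : Int) (h : 0 ≤ i) :
    PySem.List.pyGetD (x :: y :: z :: l) (i + 3) 0 = PySem.List.pyGetD l i 0 := by
  rw [PySem.List.pyGetD_of_nonneg _ _ (by omega), PySem.List.pyGetD_of_nonneg _ _ h,
      show (i + 3).toNat = i.toNat + 3 from by omega]
  simp [List.getD]

-- the k-th residue-class pass, as a map over the range
def pvMF (data : List Int) (k : Int) : List Int :=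
  (PySem.List.pyRange k (data.length : Int) 3).map (fun f => PySem.List.pyGetD data f 0)

theorem pv_mF_cons3 (x y z : Int) (l : List Int) (k : Int) (h0 : 0 ≤ k) (h2 : k ≤ 2) :
    pvMF (x :: y :: z :: l) k = PySem.List.pyGetD (x :: y :: z :: l) k 0 :: pvMF l k := by
  unfold pvMF
  have hlen : (((x :: y :: z :: l).length : Nat) : Int) = (l.length : Int) + 3 := by simp; ring
  rw [hlen, pv_pyRange3_cons k _ (by omega), pv_pyRange3_shift k (l.length : Int)]
  simp only [List.map_cons, List.map_map]
  congr 1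
  apply List.map_congr_left
  intro e he
  have := (PySem.List.mem_pyRange_iff_of_pos (a := k) (b := (l.length : Int)) (s := 3) (by norm_num) e).mp he
  simp only [Function.comp]
  exact pv_pyGetD_cons3 x y z l e (by omega)

theorem pv_mF_eq : ∀ (data : List Int) (k : Int), 0 ≤ k → k ≤ 2 →
    pvMF data k = pvEvery3 (data.drop k.toNat)
  | [], k, h0, h2 => by
    have : k = 0 ∨ k = 1 ∨ k = 2 := by omega
    rcases this with h | h | h <;> subst h <;>
      simp only [pvMF, List.length_nil, Nat.cast_zero] <;>
      rw [pv_pyRange3_nil _ _ (by norm_num)] <;> simp [pvEvery3]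
  | [x], k, h0, h2 => by
    have hl : ((([x] : List Int)).length : Int) = 1 := by simp
    have : k = 0 ∨ k = 1 ∨ k = 2 := by omega
    rcases this with h | h | h <;> subst h <;> simp only [pvMF, hl]
    · rw [show PySem.List.pyRange 0 (1 : Int) 3 = [0] from by decide]
      simp [PySem.List.pyGetD_of_nonneg _ _ (le_refl 0), pvEvery3]
    · rw [show PySem.List.pyRange 1 (1 : Int) 3 = [] from by decide]
      simp [pvEvery3]
    · rw [show PySem.List.pyRange 2 (1 : Int) 3 = [] from by decide]
      simp [pvEvery3]
  | [x, y], k, h0, h2 => by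
    have hl : ((([x, y] : List Int)).length : Int) = 2 := by simp
    have : k = 0 ∨ k = 1 ∨ k = 2 := by omega
    rcases this with h | h | h <;> subst h <;> simp only [pvMF, hl]
    · rw [show PySem.List.pyRange 0 (2 : Int) 3 = [0] from by decide]
      simp [PySem.List.pyGetD_of_nonneg _ _ (le_refl 0), pvEvery3]
    · rw [show PySem.List.pyRange 1 (2 : Int) 3 = [1] from by decide]
      simp [PySem.List.pyGetD_of_nonneg _ _ (by norm_num : (0:Int) ≤ 1), pvEvery3]
    · rw [show PySem.List.pyRange 2 (2 : Int) 3 = [] from by decide]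
      simp [pvEvery3]
  | x :: y :: z :: l, k, h0, h2 => by
    rw [pv_mF_cons3 x y z l k h0 h2, pv_mF_eq l k h0 h2]
    have : k = 0 ∨ k = 1 ∨ k = 2 := by omega
    rcases this with h | h | h <;> subst h <;>
      simp [pvEvery3, PySem.List.pyGetD_of_nonneg _ _ (by norm_num : (0:Int) ≤ 0),
            PySem.List.pyGetD_of_nonneg _ _ (by norm_num : (0:Int) ≤ 1),
            PySem.List.pyGetD_of_nonneg _ _ (by norm_num : (0:Int) ≤ 2)]

theorem pv_A_eq (data : List Int) :
    CreateListOfThreeArray data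
      = (pvEvery3 data, pvEvery3 (data.drop 1), pvEvery3 (data.drop 2)) := by
  unfold CreateListOfThreeArray
  simp only [pv_foldl_append_map, List.nil_append]
  have h0 := pv_mF_eq data 0 (by norm_num) (by norm_num)
  have h1 := pv_mF_eq data 1 (by norm_num) (by norm_num)
  have h2 := pv_mF_eq data 2 (by norm_num) (by norm_num)
  unfold pvMF at h0 h1 h2
  rw [h0, h1, h2]
  rfl

theorem pv_B_shift3 (l : List Int) : ∀ (s : Int) (acc : List Int × List Int × List Int),
    (PySem.List.enumerate l (s + 3)).foldl pvStepB acc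
      = (PySem.List.enumerate l s).foldl pvStepB acc := by
  induction l with
  | nil => intro s acc; simp [PySem.List.enumerate_nil]
  | cons x xs ih =>
    intro s acc
    rw [PySem.List.enumerate_cons, PySem.List.enumerate_cons]
    simp only [List.foldl_cons]
    have hmod : PySem.Int.mod (s + 3) 3 = PySem.Int.mod s 3 := by
      simp only [PySem.Int.mod_eq_emod_of_pos (by norm_num : (0:Int) < 3)]
      omega
    have hstep : pvStepB acc (s + 3, x) = pvStepB acc (s, x) := by
      unfold pvStepB; simp only [hmod]
    rw [hstep, show s + 3 + 1 = (s + 1) + 3 from by ring, ih (s + 1)]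

theorem pv_B_fold : ∀ (data : List Int) (acc : List Int × List Int × List Int),
    (PySem.List.enumerate data 0).foldl pvStepB acc
      = (acc.1 ++ pvEvery3 data, acc.2.1 ++ pvEvery3 (data.drop 1), acc.2.2 ++ pvEvery3 (data.drop 2))
  | [], acc => by simp [PySem.List.enumerate_nil, pvEvery3]
  | [x], acc => by
    simp [PySem.List.enumerate_cons, PySem.List.enumerate_nil, pvStepB, pvEvery3]
  | [x, y], acc => by
    simp [PySem.List.enumerate_cons, PySem.List.enumerate_nil, pvStepB, pvEvery3]
  | x :: y :: z :: l, acc => by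
    rw [PySem.List.enumerate_cons, PySem.List.enumerate_cons, PySem.List.enumerate_cons]
    simp only [List.foldl_cons]
    have e0 : pvStepB acc (0, x) = (acc.1 ++ [x], acc.2.1, acc.2.2) := by
      simp [pvStepB]
    have e1 : ∀ a : List Int × List Int × List Int, pvStepB a (0 + 1, y) = (a.1, a.2.1 ++ [y], a.2.2) := by
      intro a; simp [pvStepB]
    have e2 : ∀ a : List Int × List Int × List Int, pvStepB a (0 + 1 + 1, z) = (a.1, a.2.1, a.2.2 ++ [z]) := by
      intro a; simp [pvStepB]
    rw [e0, e1, e2]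
    rw [show (0:Int) + 1 + 1 + 1 = 0 + 3 from by ring, pv_B_shift3 l 0]
    rw [pv_B_fold l (acc.1 ++ [x], acc.2.1 ++ [y], acc.2.2 ++ [z])]
    simp [pvEvery3, List.append_assoc]

-- ===== VERDICT (by name: the statement is the Claim_ definition above) =====
theorem CreateListOfThreeArray_spec : Claim_equal_CreateListOfThreeArray := by
  intro data _
  unfold Spec_CreateListOfThreeArray CreateListOfThreeArray_alt
  rw [pv_A_eq data, pv_B_fold data ([], [], [])]
  simp
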